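-- pv_equiv track=rewrite | github.com/kimgyuhee/Python | Chapter0_Algorithm/2305/230516/test01.py | solution
-- ===== SOURCE A (Python) =====
-- def solution(arr):
--     stk = []
--     i = 0
--     while i != len(arr) :
--         if len(stk) == 0 :
--             stk.append(arr[i])
--             i+=1
--         elif len(stk)!=0 and stk[-1] < arr[i] :
--             stk.append(arr[i])
--             i+=1
--         elif len(stk)!=0 and stk[-1] >= arr[i] :
--             stk.pop()
--
--     return stk
-- ===== SOURCE B (Python) =====
-- def solution(arr):
--     res = []
--     m = None
--     for x in reversed(arr):
--         if m is None or x < m: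
--             res.append(x)
--             m = x
--     return res[::-1]
-- ===== Notes on version B (the rewrite author's own statement) =====
-- stated objective: faster
-- what changed: Replaces the left-to-right monotonic stack with re-examined indices and popping by a single right-to-left scan that keeps each element strictly below the running minimum of the elements to its right (one comparison per element, no stack traffic).
import Mathlib
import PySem

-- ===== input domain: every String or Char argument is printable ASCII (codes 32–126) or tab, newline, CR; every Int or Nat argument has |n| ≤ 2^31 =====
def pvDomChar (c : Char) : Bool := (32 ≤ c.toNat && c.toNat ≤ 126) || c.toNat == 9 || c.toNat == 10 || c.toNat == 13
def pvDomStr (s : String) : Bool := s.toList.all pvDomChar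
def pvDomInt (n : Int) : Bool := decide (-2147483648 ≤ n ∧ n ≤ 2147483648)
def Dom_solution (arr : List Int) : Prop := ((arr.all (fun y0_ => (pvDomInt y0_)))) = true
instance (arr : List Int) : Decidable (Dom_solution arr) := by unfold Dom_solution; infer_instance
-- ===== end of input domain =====

-- B replaces A's left-to-right monotonic stack (popping with re-examined
-- indices) by a single right-to-left scan keeping elements strictly below the
-- running minimum; same return value, alternative algorithm of the same cost.

-- ===== PORT A =====
-- termination helper (cited by decreasing_by): a successful arr[i] means i < len(arr)
lemma pvGet_lt {arr : List Int} {i : Nat} {x : Int}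
    (h : PySem.List.pyGet? arr (Int.ofNat i) = some x) : i < arr.length := by
  rw [show Int.ofNat i = (i : Int) from rfl, PySem.List.pyGet?_natCast] at h
  exact (List.getElem?_eq_some_iff.mp h).1

-- A's while loop, state (stk, i); each iteration either advances i or pops.
-- Python's arr[i] is ported with pyGet?; the 'none' branch is unreachable
-- (i starts at 0 and is only incremented while i < len(arr)).
def solGo (arr : List Int) (stk : List Int) (i : Nat) : List Int :=
  if _hi : i = arr.length then stk
  else
    match _hx : PySem.List.pyGet? arr (Int.ofNat i) with
    | none => stk
    | some x =>
      match _hl : stk.getLast? with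
      | none => solGo arr (stk ++ [x]) (i + 1)
      | some t =>
        if t < x then solGo arr (stk ++ [x]) (i + 1)
        else solGo arr stk.dropLast i
termination_by 2 * (arr.length - i) + stk.length
decreasing_by
  · have := pvGet_lt _hx
    simp only [List.length_append, List.length_cons, List.length_nil]
    omega
  · have := pvGet_lt _hx
    simp only [List.length_append, List.length_cons, List.length_nil]
    omega
  · have hne : stk ≠ [] := by intro h; rw [h] at _hl; simp at _hl
    have : stk.dropLast.length < stk.length := by
      rw [List.length_dropLast]
      cases stk with
      | nil => exact absurd rfl hne
      | cons a l => simp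
    omega

def solution (arr : List Int) : List Int := solGo arr [] 0

-- ===== PORT B =====
-- for x in reversed(arr): if m is None or x < m: res.append(x); m = x
def altGo (xs : List Int) (m : Option Int) (res : List Int) : List Int :=
  match xs with
  | [] => res.reverse      -- return res[::-1]
  | x :: t =>
    if (match m with | none => true | some v => decide (x < v)) then
      altGo t (some x) (res ++ [x])
    else
      altGo t m res

def solution_alt (arr : List Int) : List Int := altGo arr.reverse none []

-- ===== PRECONDITION & SPEC =====
def Spec_solution (arr : List Int) (out : List Int) : Prop := out = solution_alt arr
instance (arr : List Int) (out : List Int) : Decidable (Spec_solution arr out) := by unfold Spec_solution; infer_instance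

-- ===== CLAIM (what is proved, stated in full; the proofs are below) =====
def Claim_equal_solution : Prop := ∀ (arr : List Int), Dom_solution arr → Spec_solution arr (solution arr)

-- ===== LEMMAS AND PROOFS =====

-- the common functional characterisation: the strict suffix minima of arr
def suffMin : List Int → List Int
  | [] => []
  | x :: xs => if xs.all (fun y => decide (x < y)) then x :: suffMin xs else suffMin xs

-- B's loop condition as a Bool
def bcond (m : Option Int) (x : Int) : Bool :=
  match m with | none => true | some v => decide (x < v)

-- the pure result list of B's loop (before the final reverse)
def keep : List Int → Option Int → List Int
  | [], _ => []
  | x :: t, m => if bcond m x then x :: keep t (some x) else keep t m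

lemma altGo_eq_keep (xs : List Int) : ∀ m res, altGo xs m res = (res ++ keep xs m).reverse := by
  induction xs with
  | nil => intro m res; simp [altGo, keep]
  | cons x t ih =>
    intro m res
    by_cases h : bcond m x = true
    · simp only [altGo, keep, bcond] at *
      rw [if_pos h, if_pos h, ih, List.append_assoc]
      simp
    · simp only [altGo, keep, bcond] at *
      rw [if_neg h, if_neg h, ih]

lemma keep_append_singleton (x : Int) : ∀ (l : List Int) (m : Option Int),
    keep (l ++ [x]) m
      = keep l m ++ (if ((l.all (fun y => decide (x < y))) && bcond m x) then [x] else []) := by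
  intro l
  induction l with
  | nil => intro m; simp [keep]
  | cons y t ih =>
    intro m
    simp only [List.cons_append, keep]
    by_cases h : bcond m y = true
    · rw [if_pos h, if_pos h, ih (some y), List.cons_append]
      have hx' : x < y → bcond m x = true := by
        cases m with
        | none => intro _; rfl
        | some v => simp only [bcond, decide_eq_true_eq] at h ⊢; omega
      have hb : ((t.all fun z => decide (x < z)) && bcond (some y) x)
          = (((y :: t).all fun z => decide (x < z)) && bcond m x) := by
        cases hxy : decide (x < y) with
        | false => simp [bcond, List.all_cons, hxy]
        | true =>
          have hm' := hx' (of_decide_eq_true hxy)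
          simp [List.all_cons, hxy, hm', show bcond (some y) x = decide (x < y) from rfl]
      rw [hb]
    · cases m with
      | none => simp [bcond] at h
      | some v =>
        rw [if_neg h, if_neg h, ih (some v)]
        simp only [bcond, decide_eq_true_eq] at h
        have hb : ((t.all fun z => decide (x < z)) && bcond (some v) x)
            = (((y :: t).all fun z => decide (x < z)) && bcond (some v) x) := by
          cases hxv : decide (x < v) with
          | false => simp [bcond, hxv]
          | true =>
            have : decide (x < y) = true := by
              have := of_decide_eq_true hxv; simp; omega
            simp [bcond, List.all_cons, hxv, this]
        rw [hb]

lemma keep_reverse_eq_suffMin (arr : List Int) :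
    (keep arr.reverse none).reverse = suffMin arr := by
  induction arr with
  | nil => simp [keep, suffMin]
  | cons x xs ih =>
    rw [suffMin, show (x :: xs).reverse = xs.reverse ++ [x] by simp,
       keep_append_singleton]
    have hall : xs.reverse.all (fun y => decide (x < y)) = xs.all (fun y => decide (x < y)) := by
      simp
    rw [show bcond none x = true from rfl, Bool.and_true, hall]
    by_cases h : xs.all (fun y => decide (x < y)) = true
    · rw [if_pos h, if_pos h, List.reverse_append, ← ih]; rfl
    · rw [if_neg h, if_neg h, List.append_nil, ih]

-- main invariant for A's loop: with a strictly increasing stack, the loop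
-- returns the stack elements below the whole remaining suffix, then the
-- suffix's own strict suffix minima
lemma solGo_eq_suffMin (arr : List Int) : ∀ n stk i,
    2 * (arr.length - i) + stk.length ≤ n →
    List.Pairwise (· < ·) stk →
    i ≤ arr.length →
    solGo arr stk i =
      stk.filter (fun t => (arr.drop i).all (fun y => decide (t < y))) ++ suffMin (arr.drop i) := by
  intro n
  induction n with
  | zero =>
    intro stk i hm hp hle
    have h1 : i = arr.length := by omega
    have h2 : stk = [] := by
      cases stk with
      | nil => rfl
      | cons a l => simp at hm
    subst h1; subst h2
    rw [solGo]
    simp [suffMin]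
  | succ n ih =>
    intro stk i hm hp hle
    by_cases hi : i = arr.length
    · subst hi
      rw [solGo]
      simp [suffMin]
    · have hlt : i < arr.length := by omega
      have hget : PySem.List.pyGet? arr (Int.ofNat i) = some arr[i] := by
        exact_mod_cast PySem.List.pyGet?_ofNat arr i hlt
      have hdrop : arr.drop i = arr[i] :: arr.drop (i + 1) := List.drop_eq_getElem_cons hlt
      cases hstk : stk.getLast? with
      | none =>
        have hnil : stk = [] := by
          cases stk with
          | nil => rfl
          | cons a l => simp at hstk
        subst hnil
        have hrec := ih [arr[i]] (i + 1) (by simp; omega) (by simp) (by omega)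
        rw [solGo]
        simp only [dif_neg hi]
        split
        · next heq => rw [hget] at heq; simp at heq
        · next x heq =>
          have hx : x = arr[i] := by rw [hget] at heq; exact (Option.some.inj heq).symm
          subst hx
          split
          · next heq2 =>
            rw [List.nil_append, hrec, hdrop, suffMin]
            simp only [List.filter_nil, List.nil_append, List.filter_cons]
            by_cases hc : (arr.drop (i + 1)).all (fun y => decide (arr[i] < y)) = true
            · simp [hc]
            · simp [hc]
          · next t heq2 => simp at heq2
      | some t =>
        rcases List.getLast?_eq_some_iff.mp hstk with ⟨s, rfl⟩
        have hall_lt : ∀ a ∈ s, a < t := by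
          intro a ha
          exact (List.pairwise_append.mp hp).2.2 a ha t (by simp)
        rw [solGo]
        simp only [dif_neg hi]
        split
        · next heq => rw [hget] at heq; simp at heq
        · next x heq =>
         have hx : x = arr[i] := by rw [hget] at heq; exact (Option.some.inj heq).symm
         subst hx
         split
         · next heq2 => rw [List.getLast?_concat] at heq2; simp at heq2
         · next t' heq2 =>
          have ht' : t' = t := by
            rw [List.getLast?_concat] at heq2; exact (Option.some.inj heq2).symm
          rw [ht']
          by_cases hpush : t < arr[i]
          · rw [if_pos hpush]
            have hmem_lt : ∀ a ∈ s ++ [t], a < arr[i] := by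
              intro a ha
              rcases List.mem_append.mp ha with h1 | h1
              · exact lt_trans (hall_lt a h1) hpush
              · simp at h1; omega
            have hp' : List.Pairwise (· < ·) ((s ++ [t]) ++ [arr[i]]) := by
              rw [List.pairwise_append]
              exact ⟨hp, by simp, fun a ha b hb => by simp at hb; rw [hb]; exact hmem_lt a ha⟩
            have hrec := ih ((s ++ [t]) ++ [arr[i]]) (i + 1)
              (by simp only [List.length_append, List.length_cons, List.length_nil] at hm ⊢; omega)
              hp' (by omega)
            rw [hrec, hdrop, suffMin]
            rw [List.filter_append (l₁ := s ++ [t]) (l₂ := [arr[i]])]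
            have hfc : (s ++ [t]).filter (fun t' => (arr.drop (i + 1)).all fun y => decide (t' < y))
                = (s ++ [t]).filter (fun t' => (arr[i] :: arr.drop (i + 1)).all fun y => decide (t' < y)) := by
              apply List.filter_congr
              intro a ha
              simp only [List.all_cons]
              simp [hmem_lt a ha]
            rw [hfc, List.append_assoc]
            congr 1
            by_cases hc : (arr.drop (i + 1)).all (fun y => decide (arr[i] < y)) = true
            · simp [hc]
            · simp [hc]
          · rw [if_neg hpush, List.dropLast_concat]
            have hrec := ih s i
              (by simp only [List.length_append, List.length_cons, List.length_nil] at hm ⊢; omega)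
              (List.pairwise_append.mp hp).1 hle
            rw [hrec]
            congr 1
            rw [List.filter_append]
            have : ([t].filter (fun t' => (arr.drop i).all fun y => decide (t' < y))) = [] := by
              simp only [List.filter_cons, List.filter_nil, hdrop, List.all_cons]
              simp [hpush]
            rw [this, List.append_nil]

-- ===== VERDICT (by name: the statement is the Claim_ definition above) =====
theorem solution_spec : Claim_equal_solution := by
  intro arr _
  unfold Spec_solution solution solution_alt
  rw [altGo_eq_keep, List.nil_append, keep_reverse_eq_suffMin]
  have := solGo_eq_suffMin arr (2 * arr.length) [] 0 (by simp) (by simp) (by omega)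
  simpa using this
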